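-- pv_equiv track=rewrite | github.com/jorzaiy/Threadloom | backend/state_bridge.py | derive_risks_clues_from_signals
-- ===== SOURCE A (Python) =====
-- def derive_risks_clues_from_signals(items: list[dict]) -> tuple[list[str], list[str]]:
--     risks = []
--     clues = []
--     for item in items or []:
--         if not isinstance(item, dict):
--             continue
--         signal_type = str(item.get('type', '') or 'mixed').strip() or 'mixed'
--         text = str(item.get('text', '') or '').strip()
--         if not text:
--             continue
--         if signal_type in {'risk', 'mixed'} and text not in risks:
--             risks.append(text)
--         if signal_type in {'clue', 'mixed'} and text not in clues:
--             clues.append(text)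
--     return risks[:4], clues[:4]
-- ===== SOURCE B (Python) =====
-- def derive_risks_clues_from_signals(items: list[dict]) -> tuple[list[str], list[str]]:
--     # Normalize once into (signal_type, text) entries, then two independent
--     # order-preserving dedup passes with seen-sets; cap 4 applied at the end.
--     entries = []
--     for item in (items or []):
--         if not isinstance(item, dict):
--             continue
--         signal_type = str(item.get('type', '') or 'mixed').strip() or 'mixed'
--         text = str(item.get('text', '') or '').strip()
--         if text:
--             entries.append((signal_type, text))
--
--     def dedup(accepted):
--         seen = set()
--         out = []
--         for t, x in entries:
--             if t in accepted and x not in seen: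
--                 seen.add(x)
--                 out.append(x)
--         return out[:4]
--
--     return dedup({'risk', 'mixed'}), dedup({'clue', 'mixed'})
-- ===== Notes on version B (the rewrite author's own statement) =====
-- stated objective: alternative
-- what changed: A interleaves both dedup lists in one loop with 'text not in list' scans; B first normalizes items into a (type,text) entry list, then runs two independent order-preserving seen-set dedup passes and caps each at 4 afterwards.
import Mathlib
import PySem

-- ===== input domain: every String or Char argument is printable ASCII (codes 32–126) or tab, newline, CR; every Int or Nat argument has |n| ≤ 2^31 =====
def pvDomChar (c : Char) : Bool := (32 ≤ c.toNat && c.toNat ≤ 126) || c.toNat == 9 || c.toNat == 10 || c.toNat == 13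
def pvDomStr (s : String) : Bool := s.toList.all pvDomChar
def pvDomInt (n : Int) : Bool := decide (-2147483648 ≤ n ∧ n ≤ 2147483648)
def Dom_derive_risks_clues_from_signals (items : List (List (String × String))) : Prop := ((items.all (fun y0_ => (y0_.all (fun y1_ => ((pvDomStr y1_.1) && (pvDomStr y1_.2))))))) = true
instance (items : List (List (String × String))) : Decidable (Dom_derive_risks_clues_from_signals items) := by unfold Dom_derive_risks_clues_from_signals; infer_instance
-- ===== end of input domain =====

-- B normalizes the items once into (type, text) entries and then runs two independent
-- seen-set dedup passes (cap 4 applied last); same return value as A (objective: alternative).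

-- ===== PORT A =====
-- loop body of A's single for-loop, updating (risks, clues)
def pvAStep (rc : List String × List String) (item : List (String × String)) :
    List String × List String :=
  let t0 := PySem.Dict.getD (PySem.Dict.mk item) "type" ""
  let t1 := PySem.Str.strip (if t0 = "" then "mixed" else t0)
  let signal_type := if t1 = "" then "mixed" else t1
  let text := PySem.Str.strip (PySem.Dict.getD (PySem.Dict.mk item) "text" "")
  if text = "" then rc
  else
    let risks := if signal_type ∈ ["risk", "mixed"] ∧ text ∉ rc.1 then rc.1 ++ [text] else rc.1
    let clues := if signal_type ∈ ["clue", "mixed"] ∧ text ∉ rc.2 then rc.2 ++ [text] else rc.2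
    (risks, clues)

def derive_risks_clues_from_signals (items : List (List (String × String))) :
    List String × List String :=
  let rc := items.foldl pvAStep ([], [])
  (rc.1.take 4, rc.2.take 4)   -- risks[:4], clues[:4] (nonnegative stop: take is exact)

-- ===== PORT B =====
-- loop body of B's normalization loop (appends one (signal_type, text) entry or nothing)
def pvEntryStep (acc : List (String × String)) (item : List (String × String)) :
    List (String × String) :=
  let t0 := PySem.Dict.getD (PySem.Dict.mk item) "type" ""
  let t1 := PySem.Str.strip (if t0 = "" then "mixed" else t0)
  let signal_type := if t1 = "" then "mixed" else t1
  let text := PySem.Str.strip (PySem.Dict.getD (PySem.Dict.mk item) "text" "")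
  if text = "" then acc else acc ++ [(signal_type, text)]

-- B's inner dedup(accepted): seen-set pass over the entries, then out[:4]
def pvDedup (entries : List (String × String)) (accepted : List String) : List String :=
  (entries.foldl
      (fun (st : PySem.Set String × List String) e =>
        if e.1 ∈ accepted ∧ e.2 ∉ st.1 then (PySem.Set.add st.1 e.2, st.2 ++ [e.2]) else st)
      (PySem.Set.empty, [])).2.take 4

def derive_risks_clues_from_signals_alt (items : List (List (String × String))) :
    List String × List String :=
  let entries := items.foldl pvEntryStep []
  (pvDedup entries ["risk", "mixed"], pvDedup entries ["clue", "mixed"])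

-- ===== PRECONDITION & SPEC =====
def Spec_derive_risks_clues_from_signals (items : List (List (String × String))) (out : List String × List String) : Prop := out = derive_risks_clues_from_signals_alt items
instance (items : List (List (String × String))) (out : List String × List String) : Decidable (Spec_derive_risks_clues_from_signals items out) := by unfold Spec_derive_risks_clues_from_signals; infer_instance

-- ===== CLAIM (what is proved, stated in full; the proofs are below) =====
def Claim_equal_derive_risks_clues_from_signals : Prop := ∀ (items : List (List (String × String))), Dom_derive_risks_clues_from_signals items → Spec_derive_risks_clues_from_signals items (derive_risks_clues_from_signals items)

-- ===== LEMMAS AND PROOFS =====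

/-- One-component dedup step: append `e.2` when the type is accepted and the text is new. -/
def pvG (accepted : List String) (r : List String) (e : String × String) : List String :=
  if e.1 ∈ accepted ∧ e.2 ∉ r then r ++ [e.2] else r

lemma pvEntryStep_append (items : List (List (String × String))) :
    ∀ acc, items.foldl pvEntryStep acc = acc ++ items.foldl pvEntryStep [] := by
  induction items with
  | nil => intro acc; simp
  | cons it its ih =>
    intro acc
    simp only [List.foldl]
    rw [ih (pvEntryStep acc it), ih (pvEntryStep [] it)]
    have h : pvEntryStep acc it = acc ++ pvEntryStep [] it := by
      simp only [pvEntryStep]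
      split <;> simp
    rw [h, List.append_assoc]

lemma pvDedup_fold (accepted : List String) (es : List (String × String)) :
    ∀ s : List String,
      es.foldl
        (fun (st : PySem.Set String × List String) e =>
          if e.1 ∈ accepted ∧ e.2 ∉ st.1 then (PySem.Set.add st.1 e.2, st.2 ++ [e.2]) else st)
        (s, s)
      = (es.foldl (pvG accepted) s, es.foldl (pvG accepted) s) := by
  induction es with
  | nil => intro s; rfl
  | cons e es ih =>
    intro s
    simp only [List.foldl, pvG]
    by_cases h : e.1 ∈ accepted ∧ e.2 ∉ s
    · rw [if_pos h, if_pos h]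
      have hadd : PySem.Set.add s e.2 = s ++ [e.2] := by
        simp [PySem.Set.add, PySem.Set.contains, h.2]
      rw [hadd]; exact ih (s ++ [e.2])
    · rw [if_neg h, if_neg h]; exact ih s

lemma pvMainFold (items : List (List (String × String))) :
    ∀ r c : List String,
      items.foldl pvAStep (r, c)
      = ((items.foldl pvEntryStep []).foldl (pvG ["risk", "mixed"]) r,
         (items.foldl pvEntryStep []).foldl (pvG ["clue", "mixed"]) c) := by
  induction items with
  | nil => intro r c; rfl
  | cons it its ih =>
    intro r c
    simp only [List.foldl]
    rw [pvEntryStep_append its (pvEntryStep [] it)]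
    simp only [pvAStep, pvEntryStep]
    by_cases h : PySem.Str.strip (PySem.Dict.getD (PySem.Dict.mk it) "text" "") = ""
    · rw [if_pos h, if_pos h]
      simpa using ih r c
    · rw [if_neg h, if_neg h]
      rw [ih]
      simp [pvG]

-- ===== VERDICT (by name: the statement is the Claim_ definition above) =====
theorem derive_risks_clues_from_signals_spec : Claim_equal_derive_risks_clues_from_signals := by
  intro items _
  show derive_risks_clues_from_signals items = derive_risks_clues_from_signals_alt items
  simp only [derive_risks_clues_from_signals, derive_risks_clues_from_signals_alt, pvDedup]
  have hempty : (PySem.Set.empty : PySem.Set String) = ([] : List String) := rfl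
  rw [hempty, pvDedup_fold, pvDedup_fold, pvMainFold]
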